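-- pv_equiv track=rewrite | github.com/amrevr/Deterministic-NLP | base/nlp.py | nlp
-- ===== SOURCE A (Python) =====
-- def nlp(emotion_words, tokens):
--     emotion_scores = {emotion: 0 for emotion in emotion_words}  # Initialize emotion scores
--
--     for token in tokens:
--         for emotion, related_words in emotion_words.items():
--             if token in related_words:
--                 emotion_scores[emotion] += 1  # Increment score for positive emotion word match
--             else:
--                 emotion_scores[emotion] -= 1
--
--      # Determine the most expressed emotion(s)
--     if emotion_scores:
--         max_score = max(emotion_scores.values())
--         most_expressed_emotions = [emotion for emotion, score in emotion_scores.items() if score == max_score]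
--
--         # Returns multitude of emotions if a tie occurs
--         return ", ".join(most_expressed_emotions) if len(most_expressed_emotions) > 1 else most_expressed_emotions[0]
--     else:
--         return None  # No emotions detected, theoritically should never happen
-- ===== SOURCE B (Python) =====
-- def nlp(emotion_words, tokens):
--     if not emotion_words:
--         return None
--     # inverted index: word -> emotions whose related-word list contains it (once per emotion)
--     index = {}
--     for emotion, words in emotion_words.items():
--         for w in dict.fromkeys(words):
--             index.setdefault(w, []).append(emotion)
--     # matches per emotion in one pass over the tokens (score = 2*matches - len(tokens))
--     matches = {emotion: 0 for emotion in emotion_words}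
--     for token in tokens:
--         for emotion in index.get(token, []):
--             matches[emotion] += 1
--     # running argmax keeping all ties, in insertion order
--     best = None
--     winners = []
--     for emotion, m in matches.items():
--         if best is None or m > best:
--             best = m
--             winners = [emotion]
--         elif m == best:
--             winners.append(emotion)
--     return ", ".join(winners) if len(winners) > 1 else winners[0]
-- ===== Notes on version B (the rewrite author's own statement) =====
-- stated objective: faster
-- what changed: Instead of scanning every emotion's word list for every token (and keeping ±1 scores, then a max+filter pass), B builds an inverted word->emotions index once, counts matches per emotion in one pass over the tokens (score = 2*matches - len(tokens), so the argmax set is unchanged), and picks the winners with a single running-argmax pass.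
import Mathlib
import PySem

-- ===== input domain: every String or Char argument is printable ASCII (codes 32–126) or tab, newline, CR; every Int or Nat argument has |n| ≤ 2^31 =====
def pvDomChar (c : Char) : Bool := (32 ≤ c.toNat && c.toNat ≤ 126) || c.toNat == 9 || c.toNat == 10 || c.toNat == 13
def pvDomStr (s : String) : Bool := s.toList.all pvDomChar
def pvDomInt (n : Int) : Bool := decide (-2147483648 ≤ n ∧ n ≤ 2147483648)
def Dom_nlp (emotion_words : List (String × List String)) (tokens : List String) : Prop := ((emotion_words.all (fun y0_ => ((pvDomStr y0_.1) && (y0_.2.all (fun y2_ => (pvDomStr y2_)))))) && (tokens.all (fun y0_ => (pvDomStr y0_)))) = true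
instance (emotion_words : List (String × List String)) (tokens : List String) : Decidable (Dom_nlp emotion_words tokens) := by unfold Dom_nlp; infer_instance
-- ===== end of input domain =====

-- B replaces A's token×emotion×word scan by an inverted word→emotions index plus a single
-- running-argmax pass (score = 2·matches − #tokens, so the argmax sets coincide); objective: faster.

-- ===== PORT A =====
def nlp (emotion_words : List (String × List String)) (tokens : List String) : Option String :=
  let d := PySem.Dict.ofList emotion_words
  let scores0 := d.keys.foldl (fun s e => s.insert e (0 : Int)) PySem.Dict.empty
  let scores := tokens.foldl (fun s token =>
      d.items.foldl (fun s p =>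
        if p.2.contains token then s.modify p.1 0 (· + 1) else s.modify p.1 0 (· - 1)) s) scores0
  if scores.size ≠ 0 then
    match PySem.List.max? scores.values (fun v => v) with
    | none => none
    | some maxScore =>
      let most := (scores.items.filter (fun p => p.2 == maxScore)).map (·.1)
      if most.length > 1 then some (PySem.Str.join ", " most) else PySem.List.pyGet? most 0
  else none

-- ===== PORT B =====
def nlp_alt (emotion_words : List (String × List String)) (tokens : List String) : Option String :=
  let d := PySem.Dict.ofList emotion_words
  if d.size = 0 then none else
  let index := d.items.foldl (fun idx p =>
      (PySem.List.dedup p.2).foldl (fun idx w => idx.modify w ([] : List String) (· ++ [p.1])) idx)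
    PySem.Dict.empty
  let m0 := d.keys.foldl (fun s e => s.insert e (0 : Int)) PySem.Dict.empty
  let mcounts := tokens.foldl (fun s token =>
      (index.getD token []).foldl (fun s e => s.modify e 0 (· + 1)) s) m0
  let r := mcounts.items.foldl (fun (acc : Option Int × List String) p =>
      match acc.1 with
      | none => (some p.2, [p.1])
      | some b => if p.2 > b then (some p.2, [p.1])
                  else if p.2 == b then (acc.1, acc.2 ++ [p.1]) else acc)
    ((none, []) : Option Int × List String)
  if r.2.length > 1 then some (PySem.Str.join ", " r.2) else PySem.List.pyGet? r.2 0

-- ===== PRECONDITION & SPEC =====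
def Spec_nlp (emotion_words : List (String × List String)) (tokens : List String) (out : Option String) : Prop := out = nlp_alt emotion_words tokens
instance (emotion_words : List (String × List String)) (tokens : List String) (out : Option String) : Decidable (Spec_nlp emotion_words tokens out) := by unfold Spec_nlp; infer_instance

-- ===== CLAIM (what is proved, stated in full; the proofs are below) =====
def Claim_equal_nlp : Prop := ∀ (emotion_words : List (String × List String)) (tokens : List String), Dom_nlp emotion_words tokens → Spec_nlp emotion_words tokens (nlp emotion_words tokens)

-- ===== LEMMAS AND PROOFS =====

lemma pvBeqAffine (T B c : Int) : ((2 * c - T) == (2 * B - T)) = (c == B) := by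
  by_cases h : c = B
  · subst h; simp
  · have h2 : 2 * c - T ≠ 2 * B - T := by omega
    simp [h, h2]


lemma pvInitItems (K : List String) (h : K.Nodup) :
    (K.foldl (fun s e => s.insert e (0 : Int)) PySem.Dict.empty).items
      = K.map (fun k => (k, (0 : Int))) := by
  have := PySem.Dict.items_foldl_insert_fresh (l := K) (k := fun a => a) (v := fun _ => (0 : Int))
      (d := PySem.Dict.empty) (by intro a _; exact PySem.Dict.contains_empty a) (by simpa using h)
  simpa using this

lemma pvInnerA_ne (t : String) (ps : List (String × List String)) (s : PySem.Dict String Int)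
    (k : String) (h : k ∉ ps.map (·.1)) :
    (ps.foldl (fun s p => if p.2.contains t then s.modify p.1 0 (· + 1) else s.modify p.1 0 (· - 1)) s).getD k 0
      = s.getD k 0 := by
  induction ps generalizing s with
  | nil => rfl
  | cons p ps ih =>
    simp only [List.map_cons, List.mem_cons, not_or] at h
    rw [List.foldl_cons, ih _ h.2]
    by_cases hc : t ∈ p.2 <;>
      simp [hc, PySem.Dict.getD_modify_of_ne _ _ _ h.1]

lemma pvInnerA (t : String) (ps : List (String × List String)) (hnd : (ps.map (·.1)).Nodup)
    (k : String) (w : List String) (hm : (k, w) ∈ ps) (s : PySem.Dict String Int) :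
    (ps.foldl (fun s p => if p.2.contains t then s.modify p.1 0 (· + 1) else s.modify p.1 0 (· - 1)) s).getD k 0
      = s.getD k 0 + (if w.contains t then (1 : Int) else -1) := by
  induction ps generalizing s with
  | nil => simp at hm
  | cons p ps ih =>
    simp only [List.map_cons, List.nodup_cons] at hnd
    rcases List.mem_cons.mp hm with heq | hmem
    · subst heq
      have hk : k ∉ ps.map (·.1) := by simpa using hnd.1
      rw [List.foldl_cons, pvInnerA_ne t ps _ k hk]
      by_cases hc : t ∈ w <;>
        simp [hc, PySem.Dict.getD_modify_self] <;> omega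
    · have hne : k ≠ p.1 := by
        intro he; exact hnd.1 (he ▸ (List.mem_map.mpr ⟨(k, w), hmem, rfl⟩))
      rw [List.foldl_cons, ih hnd.2 hmem]
      by_cases hc : t ∈ p.2 <;>
        simp [hc, PySem.Dict.getD_modify_of_ne _ _ _ hne]

lemma pvScoreA (ps : List (String × List String)) (hnd : (ps.map (·.1)).Nodup)
    (k : String) (w : List String) (hm : (k, w) ∈ ps) :
    ∀ (toks : List String) (s : PySem.Dict String Int),
    (toks.foldl (fun s token =>
        ps.foldl (fun s p => if p.2.contains token then s.modify p.1 0 (· + 1) else s.modify p.1 0 (· - 1)) s) s).getD k 0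
      = s.getD k 0 + 2 * ((toks.filter (fun t => w.contains t)).length : Int) - (toks.length : Int) := by
  intro toks
  induction toks with
  | nil => intro s; simp
  | cons t toks ih =>
    intro s
    rw [List.foldl_cons, ih, pvInnerA t ps hnd k w hm s]
    by_cases hc : t ∈ w <;> simp [hc] <;> omega

lemma pvKeysModifyMem (s : PySem.Dict String Int) (k : String) (hk : k ∈ s.keys) (d0 : Int) (f : Int → Int) :
    (s.modify k d0 f).keys = s.keys := by
  rw [PySem.Dict.keys_modify]
  exact PySem.Dict.keys_insert_of_contains _ _ ((PySem.Dict.contains_iff_mem_keys _ _).mpr hk)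

lemma pvKeysInnerA (t : String) (ps : List (String × List String)) :
    ∀ (s : PySem.Dict String Int), (∀ x ∈ ps, x.1 ∈ s.keys) →
    (ps.foldl (fun s p => if p.2.contains t then s.modify p.1 0 (· + 1) else s.modify p.1 0 (· - 1)) s).keys
      = s.keys := by
  induction ps with
  | nil => intro s _; rfl
  | cons p ps ih =>
    intro s h
    have hk : p.1 ∈ s.keys := h p (by simp)
    have hstep : (if p.2.contains t then s.modify p.1 0 (· + 1) else s.modify p.1 0 (· - 1)).keys = s.keys := by
      by_cases hc : t ∈ p.2 <;> simp [hc, pvKeysModifyMem s p.1 hk]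
    rw [List.foldl_cons, ih _ (by intro x hx; rw [hstep]; exact h x (by simp [hx])), hstep]

lemma pvKeysA (ps : List (String × List String)) :
    ∀ (toks : List String) (s : PySem.Dict String Int), (∀ x ∈ ps, x.1 ∈ s.keys) →
    (toks.foldl (fun s token =>
        ps.foldl (fun s p => if p.2.contains token then s.modify p.1 0 (· + 1) else s.modify p.1 0 (· - 1)) s) s).keys
      = s.keys := by
  intro toks
  induction toks with
  | nil => intro s _; rfl
  | cons t toks ih =>
    intro s h
    have hstep := pvKeysInnerA t ps s h
    rw [List.foldl_cons, ih _ (by intro x hx; rw [hstep]; exact h x hx), hstep]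

lemma pvKeysInnerB (es : List String) :
    ∀ (s : PySem.Dict String Int), (∀ e ∈ es, e ∈ s.keys) →
    (es.foldl (fun s e => s.modify e 0 (· + 1)) s).keys = s.keys := by
  induction es with
  | nil => intro s _; rfl
  | cons e es ih =>
    intro s h
    have hstep : (s.modify e 0 (· + 1)).keys = s.keys := pvKeysModifyMem s e (h e (by simp)) 0 _
    rw [List.foldl_cons, ih _ (by intro x hx; rw [hstep]; exact h x (by simp [hx])), hstep]

lemma pvKeysB (idx : PySem.Dict String (List String)) (K : List String)
    (hidx : ∀ t e, e ∈ idx.getD t [] → e ∈ K) :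
    ∀ (toks : List String) (s : PySem.Dict String Int), (∀ x ∈ K, x ∈ s.keys) →
    (toks.foldl (fun s token => (idx.getD token []).foldl (fun s e => s.modify e 0 (· + 1)) s) s).keys
      = s.keys := by
  intro toks
  induction toks with
  | nil => intro s _; rfl
  | cons t toks ih =>
    intro s h
    have hstep := pvKeysInnerB (idx.getD t []) s (fun e he => h e (hidx t e he))
    rw [List.foldl_cons, ih _ (by intro x hx; rw [hstep]; exact h x hx), hstep]

lemma pvIndexFlat (items : List (String × List String)) (d0 : PySem.Dict String (List String)) :
    items.foldl (fun idx p =>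
        (PySem.List.dedup p.2).foldl (fun idx w => idx.modify w ([] : List String) (· ++ [p.1])) idx) d0
      = (items.flatMap (fun p => (PySem.List.dedup p.2).map (fun w => (w, p.1)))).foldl
          (fun d q => d.modify q.1 ([] : List String) (· ++ [q.2])) d0 := by
  induction items generalizing d0 with
  | nil => rfl
  | cons p items ih =>
    rw [List.foldl_cons, List.flatMap_cons, List.foldl_append, ih, List.foldl_map]

lemma pvMatchB (idx : PySem.Dict String (List String)) (k : String) (w : List String)
    (hc : ∀ t : String, ((idx.getD t []).count k : Int) = if w.contains t then 1 else 0) :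
    ∀ (toks : List String) (s : PySem.Dict String Int),
    (toks.foldl (fun s token => (idx.getD token []).foldl (fun s e => s.modify e 0 (· + 1)) s) s).getD k 0
      = s.getD k 0 + ((toks.filter (fun t => w.contains t)).length : Int) := by
  intro toks
  induction toks with
  | nil => intro s; simp
  | cons t toks ih =>
    intro s
    rw [List.foldl_cons, ih, PySem.Dict.getD_foldl_modify_add_one, hc t]
    by_cases hw : t ∈ w <;> simp [hw] <;> omega

lemma pvAffineMax (T : Int) (g : String → Int) (l : List String) : ∀ a : Int,
    l.foldl (fun acc k => max acc (2 * g k - T)) (2 * a - T)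
      = 2 * l.foldl (fun acc k => max acc (g k)) a - T := by
  induction l with
  | nil => intro a; rfl
  | cons x l ih =>
    intro a
    rw [List.foldl_cons, List.foldl_cons,
      show max (2 * a - T) (2 * g x - T) = 2 * max a (g x) - T by omega, ih]


lemma pvCountPairs (k t : String) : ∀ (l : List String), l.Nodup →
    (((l.map (fun w => (w, k))).filter (fun q => q.1 == t)).map (·.2)).count k
      = if t ∈ l then 1 else 0 := by
  intro l
  induction l with
  | nil => simp
  | cons x l ih =>
    intro hnd
    simp only [List.nodup_cons] at hnd
    by_cases hx : x = t
    · subst hx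
      simp [ih hnd.2, hnd.1]
    · simp [hx, ih hnd.2, Ne.symm hx]

lemma pvCountPairsNe (k k' t : String) (hkk : k' ≠ k) (l : List String) :
    (((l.map (fun w => (w, k'))).filter (fun q => q.1 == t)).map (·.2)).count k = 0 := by
  rw [List.count_eq_zero]
  intro hmem
  rcases List.mem_map.mp hmem with ⟨q, hq, hq2⟩
  rcases List.mem_map.mp (List.mem_filter.mp hq).1 with ⟨w', _, hw'⟩
  apply hkk
  rw [← hw'] at hq2; simpa using hq2

lemma pvIndexCount (items : List (String × List String)) (hnd : (items.map (·.1)).Nodup)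
    (k : String) (w : List String) (hm : (k, w) ∈ items) (t : String) :
    ((((items.flatMap (fun p => (PySem.List.dedup p.2).map (fun w => (w, p.1)))).filter
        (fun q => q.1 == t)).map (·.2)).count k : Int)
      = if w.contains t then 1 else 0 := by
  have key : ∀ (its : List (String × List String)), (its.map (·.1)).Nodup → (k, w) ∈ its →
      (((its.flatMap (fun p => (PySem.List.dedup p.2).map (fun w => (w, p.1)))).filter
        (fun q => q.1 == t)).map (·.2)).count k = (if t ∈ w then 1 else 0) := by
    intro its
    induction its with
    | nil => intro _ h; simp at h
    | cons p its ih =>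
      intro hnd hm
      simp only [List.map_cons, List.nodup_cons] at hnd
      have hsplit : ((((p :: its).flatMap (fun p => (PySem.List.dedup p.2).map (fun w => (w, p.1)))).filter
          (fun q => q.1 == t)).map (·.2)).count k
        = ((((PySem.List.dedup p.2).map (fun w => (w, p.1))).filter (fun q => q.1 == t)).map (·.2)).count k
          + (((its.flatMap (fun p => (PySem.List.dedup p.2).map (fun w => (w, p.1)))).filter
            (fun q => q.1 == t)).map (·.2)).count k := by
        rw [List.flatMap_cons, List.filter_append, List.map_append, List.count_append]
      rcases List.mem_cons.mp hm with heq | hmem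
      · have hk : k ∉ its.map (·.1) := by rw [← heq] at hnd; simpa using hnd.1
        have htail : (((its.flatMap (fun p => (PySem.List.dedup p.2).map (fun w => (w, p.1)))).filter
            (fun q => q.1 == t)).map (·.2)).count k = 0 := by
          rw [List.count_eq_zero]
          intro hmem2
          rcases List.mem_map.mp hmem2 with ⟨q, hq, hq2⟩
          rcases List.mem_flatMap.mp (List.mem_filter.mp hq).1 with ⟨p', hp', hq3⟩
          rcases List.mem_map.mp hq3 with ⟨w', _, hw'⟩
          apply hk
          exact List.mem_map.mpr ⟨p', hp', by rw [← hw'] at hq2; simpa using hq2⟩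
        have hhead : ((((PySem.List.dedup p.2).map (fun w => (w, p.1))).filter (fun q => q.1 == t)).map (·.2)).count k
            = (if t ∈ w then 1 else 0) := by
          rw [← heq, pvCountPairs k t (PySem.List.dedup w) (PySem.List.nodup_dedup w)]
          by_cases hw : t ∈ w <;> simp [hw]
        rw [hsplit, hhead, htail]; omega
      · have hne : p.1 ≠ k := by
          intro he; exact hnd.1 (he ▸ (List.mem_map.mpr ⟨(k, w), hmem, rfl⟩))
        rw [hsplit, pvCountPairsNe k p.1 t hne, ih hnd.2 hmem]; omega
  rw [key items hnd hm]
  by_cases hw : t ∈ w <;> simp [hw]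


lemma pvArgmax (ps : List (String × Int)) : ∀ (b : Int) (ws : List String),
    ps.foldl (fun (acc : Option Int × List String) p =>
        match acc.1 with
        | none => (some p.2, [p.1])
        | some b => if p.2 > b then (some p.2, [p.1])
                    else if p.2 == b then (acc.1, acc.2 ++ [p.1]) else acc)
      (some b, ws)
    = (some (ps.foldl (fun a p => max a p.2) b),
       (if ps.foldl (fun a p => max a p.2) b = b then ws else [])
         ++ (ps.filter (fun p => p.2 == ps.foldl (fun a p => max a p.2) b)).map (·.1)) := by
  induction ps with
  | nil => intro b ws; simp
  | cons p ps ih =>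
    intro b ws
    have hFle : ∀ c : Int, c ≤ ps.foldl (fun a p => max a p.2) c :=
      fun c => (PySem.List.le_foldl_max_int ps (·.2) c).1
    rw [List.foldl_cons, List.foldl_cons]
    dsimp only
    rcases lt_trichotomy b p.2 with hlt | heq | hgt
    · -- strict improvement: reset the winners
      rw [if_pos (show p.2 > b from hlt), ih p.2 [p.1],
        show max b p.2 = p.2 by omega, List.filter_cons]
      have hFb : ¬ (ps.foldl (fun a p => max a p.2) p.2 = b) := by
        have := hFle p.2; omega
      rw [if_neg hFb]
      by_cases hp : ps.foldl (fun a p => max a p.2) p.2 = p.2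
      · rw [if_pos hp, if_pos (by simp [hp])]
        simp
      · rw [if_neg hp, if_neg (by simp only [beq_iff_eq]; exact fun h => hp h.symm)]
    · -- tie with the running best: append
      subst heq
      rw [if_neg (show ¬ p.2 > p.2 by omega), if_pos (by simp), ih p.2 (ws ++ [p.1]),
        show max p.2 p.2 = p.2 by omega, List.filter_cons]
      by_cases hp : ps.foldl (fun a p => max a p.2) p.2 = p.2
      · rw [if_pos hp, if_pos hp, if_pos (by simp [hp])]
        simp
      · rw [if_neg hp, if_neg hp, if_neg (by simp only [beq_iff_eq]; exact fun h => hp h.symm)]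
    · -- worse: skip
      rw [if_neg (show ¬ p.2 > b by omega),
        if_neg (show ¬ (p.2 == b) = true by simp only [beq_iff_eq]; omega), ih b ws,
        show max b p.2 = b by omega, List.filter_cons]
      have hFb : ¬ (p.2 == ps.foldl (fun a p => max a p.2) b) = true := by
        have := hFle b; simp only [beq_iff_eq]; omega
      rw [if_neg hFb]

-- pair-list filter/map exchange used on both sides
lemma pvFilterPairs (M : Int) (K : List String) (f : String → Int) :
    ((K.map (fun k => (k, f k))).filter (fun p => p.2 == M)).map (·.1)
      = K.filter (fun k => f k == M) := by
  rw [List.filter_map, List.map_map]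
  rw [show ((fun (x : String × Int) => x.1) ∘ fun k => (k, f k)) = id from rfl,
    show ((fun (p : String × Int) => p.2 == M) ∘ fun k => (k, f k)) = fun k => f k == M from rfl,
    List.map_id]

def pvCnt (d : PySem.Dict String (List String)) (tokens : List String) (k : String) : Int :=
  ((tokens.filter (fun t => (d.getD k ([] : List String)).contains t)).length : Int)

lemma nlp_eq (ew : List (String × List String)) (tokens : List String) :
    nlp ew tokens = nlp_alt ew tokens := by
  simp only [nlp, nlp_alt]
  set d := PySem.Dict.ofList ew with hdd
  have hnd : d.keys.Nodup := PySem.Dict.nodup_keys_ofList ew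
  have hitems : d.items = d.keys.map (fun k => (k, d.getD k ([] : List String))) :=
    PySem.Dict.items_eq_map_keys d hnd []
  have hfst : d.items.map (·.1) = d.keys := by
    rw [hitems, List.map_map,
      show ((fun (x : String × List String) => x.1) ∘ fun k => (k, d.getD k ([] : List String))) = id from rfl,
      List.map_id]
  have hndf : (d.items.map (·.1)).Nodup := by rw [hfst]; exact hnd
  have hmemIt : ∀ k ∈ d.keys, (k, d.getD k ([] : List String)) ∈ d.items := by
    intro k hk; rw [hitems]; exact List.mem_map.mpr ⟨k, hk, rfl⟩
  set s0 := d.keys.foldl (fun s e => s.insert e (0 : Int)) PySem.Dict.empty with hs0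
  have hs0items : s0.items = d.keys.map (fun k => (k, (0 : Int))) := pvInitItems d.keys hnd
  have hs0keys : s0.keys = d.keys := by
    simp only [PySem.Dict.keys, hs0items, List.map_map]; simp
  have hs0getD : ∀ k ∈ d.keys, s0.getD k 0 = 0 := by
    intro k hk
    exact PySem.Dict.getD_of_mem_items s0
      (by rw [hs0items]; exact List.mem_map.mpr ⟨k, hk, rfl⟩) (by rw [hs0keys]; exact hnd) 0
  -- A's scores dict
  set scores := tokens.foldl (fun s token =>
      d.items.foldl (fun s p =>
        if p.2.contains token then s.modify p.1 0 (· + 1) else s.modify p.1 0 (· - 1)) s) s0 with hsc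
  have hscKeys : scores.keys = d.keys := by
    rw [hsc, pvKeysA d.items tokens s0 (by intro x hx; rw [hs0keys, ← hfst]; exact List.mem_map.mpr ⟨x, hx, rfl⟩), hs0keys]
  have hscGetD : ∀ k ∈ d.keys,
      scores.getD k 0 = 2 * pvCnt d tokens k - (tokens.length : Int) := by
    intro k hk
    rw [hsc, pvScoreA d.items hndf k _ (hmemIt k hk) tokens s0, hs0getD k hk, pvCnt]
    omega
  have hscItems : scores.items = d.keys.map (fun k =>
      (k, 2 * pvCnt d tokens k - (tokens.length : Int))) := by
    rw [PySem.Dict.items_eq_map_keys scores (by rw [hscKeys]; exact hnd) 0, hscKeys]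
    exact List.map_congr_left (fun k hk => by rw [hscGetD k hk])
  -- B's index
  set idx := d.items.foldl (fun idx p =>
      (PySem.List.dedup p.2).foldl (fun idx w => idx.modify w ([] : List String) (· ++ [p.1])) idx)
    PySem.Dict.empty with hidx
  have hidxGet : ∀ t, idx.getD t []
      = ((d.items.flatMap (fun p => (PySem.List.dedup p.2).map (fun w => (w, p.1)))).filter
          (fun q => q.1 == t)).map (·.2) := by
    intro t
    rw [hidx, pvIndexFlat, PySem.Dict.getD_foldl_modify_append]
    simp
  have hidxCount : ∀ k ∈ d.keys, ∀ t : String, ((idx.getD t []).count k : Int)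
      = if (d.getD k ([] : List String)).contains t then 1 else 0 := by
    intro k hk t
    rw [hidxGet t]
    exact pvIndexCount d.items hndf k _ (hmemIt k hk) t
  have hidxMem : ∀ t e, e ∈ idx.getD t [] → e ∈ d.keys := by
    intro t e he
    rw [hidxGet t] at he
    rcases List.mem_map.mp he with ⟨q, hq, hq2⟩
    rcases List.mem_flatMap.mp (List.mem_filter.mp hq).1 with ⟨p', hp', hq3⟩
    rcases List.mem_map.mp hq3 with ⟨w', _, hw'⟩
    rw [← hfst]
    refine List.mem_map.mpr ⟨p', hp', ?_⟩
    rw [← hq2, ← hw']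
  -- B's match counts
  set mc := tokens.foldl (fun s token =>
      (idx.getD token []).foldl (fun s e => s.modify e 0 (· + 1)) s) s0 with hmc
  have hmcKeys : mc.keys = d.keys := by
    rw [hmc, pvKeysB idx d.keys hidxMem tokens s0 (by rw [hs0keys]; exact fun x hx => hx), hs0keys]
  have hmcGetD : ∀ k ∈ d.keys, mc.getD k 0 = pvCnt d tokens k := by
    intro k hk
    rw [hmc, pvMatchB idx k _ (fun t => hidxCount k hk t) tokens s0, hs0getD k hk, pvCnt]
    omega
  have hmcItems : mc.items = d.keys.map (fun k => (k, pvCnt d tokens k)) := by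
    rw [PySem.Dict.items_eq_map_keys mc (by rw [hmcKeys]; exact hnd) 0, hmcKeys]
    exact List.map_congr_left (fun k hk => by rw [hmcGetD k hk])
  -- sizes
  have hssize : scores.size = d.keys.length := by
    simp only [PySem.Dict.size]
    rw [hscItems, List.length_map]
  have hdsize : d.size = d.keys.length := by
    simp only [PySem.Dict.size]
    rw [hitems, List.length_map]
  rcases hK : d.keys with _ | ⟨k0, K'⟩
  · -- no emotions: both return none
    rw [if_neg (by rw [hssize, hK]; simp), if_pos (by rw [hdsize, hK]; rfl)]
  · -- at least one emotion
    rw [if_pos (by rw [hssize, hK]; simp), if_neg (by rw [hdsize, hK]; simp)]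
    have hvals : scores.values = (k0 :: K').map (fun k => 2 * pvCnt d tokens k - (tokens.length : Int)) := by
      simp only [PySem.Dict.values, hscItems, hK, List.map_map]
      rfl
    have hmax : PySem.List.max? scores.values (fun v => v)
        = some (2 * (K'.foldl (fun a k => max a (pvCnt d tokens k)) (pvCnt d tokens k0)) - (tokens.length : Int)) := by
      rw [hvals, List.map_cons, PySem.List.max?_id_cons, List.foldl_map,
        pvAffineMax (tokens.length : Int) (pvCnt d tokens) K' (pvCnt d tokens k0)]
    rw [hmax]
    dsimp only
    have hmost : (scores.items.filter (fun p =>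
          p.2 == 2 * (K'.foldl (fun a k => max a (pvCnt d tokens k)) (pvCnt d tokens k0)) - (tokens.length : Int))).map (·.1)
        = (k0 :: K').filter (fun k =>
            pvCnt d tokens k == K'.foldl (fun a k => max a (pvCnt d tokens k)) (pvCnt d tokens k0)) := by
      rw [hscItems, hK, pvFilterPairs]
      exact List.filter_congr (fun k _ =>
        pvBeqAffine (tokens.length : Int) (K'.foldl (fun a k => max a (pvCnt d tokens k)) (pvCnt d tokens k0)) (pvCnt d tokens k))
    have hr : mc.items.foldl (fun (acc : Option Int × List String) p =>
        match acc.1 with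
        | none => (some p.2, [p.1])
        | some b => if p.2 > b then (some p.2, [p.1])
                    else if p.2 == b then (acc.1, acc.2 ++ [p.1]) else acc)
      ((none, []) : Option Int × List String)
        = (some (K'.foldl (fun a k => max a (pvCnt d tokens k)) (pvCnt d tokens k0)),
           (if K'.foldl (fun a k => max a (pvCnt d tokens k)) (pvCnt d tokens k0) = pvCnt d tokens k0 then [k0] else [])
             ++ K'.filter (fun k => pvCnt d tokens k == K'.foldl (fun a k => max a (pvCnt d tokens k)) (pvCnt d tokens k0))) := by
      rw [hmcItems, hK, List.map_cons, List.foldl_cons]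
      dsimp only
      rw [pvArgmax (K'.map (fun k => (k, pvCnt d tokens k))) (pvCnt d tokens k0) [k0], List.foldl_map, pvFilterPairs]
    rw [hr]
    dsimp only
    have hwin : (k0 :: K').filter (fun k =>
          pvCnt d tokens k == K'.foldl (fun a k => max a (pvCnt d tokens k)) (pvCnt d tokens k0))
        = (if K'.foldl (fun a k => max a (pvCnt d tokens k)) (pvCnt d tokens k0) = pvCnt d tokens k0 then [k0] else [])
            ++ K'.filter (fun k => pvCnt d tokens k == K'.foldl (fun a k => max a (pvCnt d tokens k)) (pvCnt d tokens k0)) := by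
      rw [List.filter_cons]
      by_cases hb : pvCnt d tokens k0 = K'.foldl (fun a k => max a (pvCnt d tokens k)) (pvCnt d tokens k0)
      · rw [if_pos (by simpa using hb), if_pos hb.symm]; rfl
      · rw [if_neg (by simpa using hb), if_neg (fun h => hb h.symm)]; rfl
    rw [hmost, hwin]

-- ===== VERDICT (by name: the statement is the Claim_ definition above) =====
theorem nlp_spec : Claim_equal_nlp := by
  intro emotion_words tokens _
  unfold Spec_nlp
  exact nlp_eq emotion_words tokens
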